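-- pv_equiv track=rewrite | github.com/zcm58/FPVS-Toolbox-Repo | src/Tools/Stats/PySide6/stats_cross_phase.py | _condition_intersection_with_order
-- ===== SOURCE A (Python) =====
-- from typing import Dict, Iterable, List, Sequence
--
-- def _condition_intersection_with_order(
--     phase_specs: Dict[str, dict],
-- ) -> tuple[list[str], dict[str, set[str]]]:
--     """Return the ordered intersection of conditions across phases.
--
--     Also returns a mapping of phase → conditions that are missing from the
--     intersection (i.e., present in that phase only).
--     """
--
--     ordered_conditions: list[str] = []
--     common_conditions: set[str] | None = None
--     all_conditions_per_phase: dict[str, set[str]] = {}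
--
--     for label, spec in phase_specs.items():
--         conditions = spec.get("conditions") or []
--         all_conditions_per_phase[label] = set(conditions)
--         if not ordered_conditions:
--             ordered_conditions = list(conditions)
--         condition_set = set(conditions)
--         common_conditions = (
--             condition_set if common_conditions is None else common_conditions & condition_set
--         )
--
--     if not common_conditions:
--         return [], {label: set() for label in phase_specs}
--
--     missing_by_phase: dict[str, set[str]] = {}
--     for phase_label, cond_set in all_conditions_per_phase.items():
--         missing_by_phase[phase_label] = cond_set - common_conditions
--
--     return [cond for cond in ordered_conditions if cond in common_conditions], missing_by_phase
-- ===== SOURCE B (Python) =====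
-- from collections import Counter
--
--
-- def _condition_intersection_with_order(phase_specs):
--     """Counter-based re-implementation: one pass counts, per distinct condition,
--     how many phases contain it; common = conditions counted in every phase."""
--     n = len(phase_specs)
--     counter = Counter()
--     sets_by_phase = {}
--     for label, spec in phase_specs.items():
--         cond_set = set(spec.get("conditions") or [])
--         sets_by_phase[label] = cond_set
--         counter.update(cond_set)
--     common = {c for c, k in counter.items() if k == n}
--     if not common:
--         return [], {label: set() for label in phase_specs}
--     first_conditions = next(iter(phase_specs.values())).get("conditions") or []
--     return (
--         [c for c in first_conditions if c in common],
--         {label: cond_set - common for label, cond_set in sets_by_phase.items()},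
--     )
-- ===== Notes on version B (the rewrite author's own statement) =====
-- stated objective: alternative
-- what changed: Replaces the running set-intersection fold (plus the first-nonempty ordered-list tracking) by a single pass that counts, in a Counter, how many phases contain each distinct condition; common is then the conditions whose count equals the number of phases, and the ordered result is filtered from the first phase's raw conditions list.
import Mathlib
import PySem

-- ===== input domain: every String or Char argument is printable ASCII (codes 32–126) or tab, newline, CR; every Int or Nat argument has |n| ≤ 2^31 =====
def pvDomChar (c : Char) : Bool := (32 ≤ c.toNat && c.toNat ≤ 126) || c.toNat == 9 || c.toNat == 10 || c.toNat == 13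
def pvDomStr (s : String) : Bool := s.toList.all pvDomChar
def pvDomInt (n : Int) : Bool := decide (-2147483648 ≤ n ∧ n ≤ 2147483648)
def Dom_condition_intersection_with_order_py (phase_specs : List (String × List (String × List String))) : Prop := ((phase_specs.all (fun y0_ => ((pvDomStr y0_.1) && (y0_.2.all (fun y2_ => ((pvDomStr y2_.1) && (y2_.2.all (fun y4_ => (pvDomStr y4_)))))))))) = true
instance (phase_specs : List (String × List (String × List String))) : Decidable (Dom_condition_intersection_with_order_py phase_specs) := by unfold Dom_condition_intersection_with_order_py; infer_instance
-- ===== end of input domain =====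

-- B replaces A's running set-intersection fold by a one-pass per-condition Counter
-- (common = conditions counted in every phase); same cost, alternative algorithm.

-- ===== PORT A =====
-- spec.get("conditions") or []
def pvCondsA (spec : List (String × List String)) : List String :=
  (PySem.Dict.mk spec).getD "conditions" []

-- one iteration of A's loop; state = (ordered_conditions, common_conditions, all_conditions_per_phase)
def pvStepA (st : List String × Option (PySem.Set String) × PySem.Dict String (PySem.Set String))
    (p : String × List (String × List String)) :
    List String × Option (PySem.Set String) × PySem.Dict String (PySem.Set String) :=
  let conditions := pvCondsA p.2
  let allPer := st.2.2.insert p.1 (PySem.Set.ofList conditions)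
  let ordered := if st.1.isEmpty then conditions else st.1
  let conditionSet := PySem.Set.ofList conditions
  let common : PySem.Set String :=
    match st.2.1 with
    | none => conditionSet
    | some cs => PySem.Set.inter cs conditionSet
  (ordered, some common, allPer)

def condition_intersection_with_order_py (phase_specs : List (String × List (String × List String))) : List String × (List (String × List String)) :=
  let st := phase_specs.foldl pvStepA ([], none, PySem.Dict.empty)
  match st.2.1 with
  | none =>
      ([], ((phase_specs.foldl (fun d p => d.insert p.1 PySem.Set.empty)
              (PySem.Dict.empty : PySem.Dict String (PySem.Set String))).items))
  | some common =>
      if common.isEmpty then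
        ([], ((phase_specs.foldl (fun d p => d.insert p.1 PySem.Set.empty)
                (PySem.Dict.empty : PySem.Dict String (PySem.Set String))).items))
      else
        let missing := st.2.2.items.foldl
          (fun d q => d.insert q.1 (PySem.Set.diff q.2 common)) PySem.Dict.empty
        (st.1.filter (fun c => PySem.Set.contains common c), missing.items)

-- ===== PORT B =====
-- one iteration of B's loop; state = (counter, sets_by_phase)
def pvStepB (st : PySem.Dict String Int × PySem.Dict String (PySem.Set String))
    (p : String × List (String × List String)) :
    PySem.Dict String Int × PySem.Dict String (PySem.Set String) :=
  let condSet := PySem.Set.ofList (pvCondsA p.2)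
  (condSet.foldl (fun d c => d.modify c 0 (· + 1)) st.1, st.2.insert p.1 condSet)

def condition_intersection_with_order_py_alt (phase_specs : List (String × List (String × List String))) : List String × (List (String × List String)) :=
  let n := phase_specs.length
  let st := phase_specs.foldl pvStepB (PySem.Dict.empty, PySem.Dict.empty)
  let common : PySem.Set String :=
    PySem.Set.ofList ((st.1.items.filter (fun q => q.2 == (n : Int))).map (fun q => q.1))
  if common.isEmpty then
    ([], ((phase_specs.foldl (fun d p => d.insert p.1 PySem.Set.empty)
            (PySem.Dict.empty : PySem.Dict String (PySem.Set String))).items))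
  else
    let firstConds :=
      match phase_specs.head? with
      | some p => pvCondsA p.2
      | none => []
    (firstConds.filter (fun c => PySem.Set.contains common c),
     ((st.2.items.foldl (fun d q => d.insert q.1 (PySem.Set.diff q.2 common))
        (PySem.Dict.empty : PySem.Dict String (PySem.Set String))).items))

-- ===== PRECONDITION & SPEC =====
def Spec_condition_intersection_with_order_py (phase_specs : List (String × List (String × List String))) (out : List String × (List (String × List String))) : Prop := out = condition_intersection_with_order_py_alt phase_specs
instance (phase_specs : List (String × List (String × List String))) (out : List String × (List (String × List String))) : Decidable (Spec_condition_intersection_with_order_py phase_specs out) := by unfold Spec_condition_intersection_with_order_py; infer_instance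

-- ===== CLAIM (what is proved, stated in full; the proofs are below) =====
def Claim_equal_condition_intersection_with_order_py : Prop := ∀ (phase_specs : List (String × List (String × List String))), Dom_condition_intersection_with_order_py phase_specs → Spec_condition_intersection_with_order_py phase_specs (condition_intersection_with_order_py phase_specs)

-- ===== LEMMAS AND PROOFS =====

-- the set of conditions of one phase entry
def pvPhaseSet (p : String × List (String × List String)) : PySem.Set String :=
  PySem.Set.ofList (pvCondsA p.2)

-- countP p l = l.length iff p holds everywhere (general list fact)
theorem pvCountP_eq_length_iff {α : Type} (l : List α) (p : α → Bool) :
    l.countP p = l.length ↔ ∀ a ∈ l, p a := by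
  induction l with
  | nil => simp
  | cons a t ih =>
    have hle := List.countP_le_length (p := p) (l := t)
    by_cases h : p a
    · simp only [List.countP_cons, h, if_true, List.length_cons, List.mem_cons]
      constructor
      · intro he b hb; rcases hb with rfl | hb
        · exact h
        · exact (ih.mp (by omega)) b hb
      · intro hall; have := ih.mpr (fun b hb => hall b (Or.inr hb)); omega
    · simp only [List.countP_cons, List.length_cons, List.mem_cons, h, if_false, Bool.false_eq_true]
      constructor
      · intro he; omega
      · intro hall; exact absurd (hall a (Or.inl rfl)) (by simp [h])

-- A's fold, componentwise
theorem pvFoldA (ps : List (String × List (String × List String))) :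
    ∀ st, ps.foldl pvStepA st =
      (ps.foldl (fun o p => if o.isEmpty then pvCondsA p.2 else o) st.1,
       ps.foldl (fun c p => some (match c with
         | none => pvPhaseSet p
         | some cs => PySem.Set.inter cs (pvPhaseSet p))) st.2.1,
       ps.foldl (fun d p => d.insert p.1 (pvPhaseSet p)) st.2.2) := by
  induction ps with
  | nil => intro st; rfl
  | cons p rest ih =>
    intro st
    simp only [List.foldl_cons, ih]
    rfl

-- B's fold, componentwise
theorem pvFoldB (ps : List (String × List (String × List String))) :
    ∀ st, ps.foldl pvStepB st =
      (ps.foldl (fun d p => (pvPhaseSet p).foldl (fun d c => d.modify c 0 (· + 1)) d) st.1,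
       ps.foldl (fun d p => d.insert p.1 (pvPhaseSet p)) st.2) := by
  induction ps with
  | nil => intro st; rfl
  | cons p rest ih =>
    intro st
    simp only [List.foldl_cons, ih]
    rfl

-- A's common fold starting from a set
theorem pvCommonSome (ps : List (String × List (String × List String))) :
    ∀ s : PySem.Set String,
      ps.foldl (fun c p => some (match c with
        | none => pvPhaseSet p
        | some cs => PySem.Set.inter cs (pvPhaseSet p))) (some s)
      = some (ps.foldl (fun s p => PySem.Set.inter s (pvPhaseSet p)) s) := by
  induction ps with
  | nil => intro s; rfl
  | cons p rest ih => intro s; simp only [List.foldl_cons, ih]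

-- membership in a fold of intersections
theorem pvMemFoldInter (ps : List (String × List (String × List String))) :
    ∀ (s : PySem.Set String) (c : String),
      c ∈ ps.foldl (fun s p => PySem.Set.inter s (pvPhaseSet p)) s ↔
        c ∈ s ∧ ∀ p ∈ ps, c ∈ pvPhaseSet p := by
  induction ps with
  | nil => intro s c; simp
  | cons p rest ih =>
    intro s c
    simp only [List.foldl_cons, ih, PySem.Set.mem_inter, List.mem_cons]
    constructor
    · rintro ⟨⟨h1, h2⟩, h3⟩
      refine ⟨h1, fun q hq => ?_⟩
      rcases hq with rfl | hq
      · exact h2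
      · exact h3 q hq
    · rintro ⟨h1, h2⟩
      exact ⟨⟨h1, h2 p (Or.inl rfl)⟩, fun q hq => h2 q (Or.inr hq)⟩

-- B's counter: value at c counts the phases containing c
theorem pvCounterGetD (ps : List (String × List (String × List String))) :
    ∀ (d : PySem.Dict String Int) (c : String),
      (ps.foldl (fun d p => (pvPhaseSet p).foldl (fun d c => d.modify c 0 (· + 1)) d) d).getD c 0
        = d.getD c 0 + (ps.countP (fun p => decide (c ∈ pvPhaseSet p)) : Int) := by
  induction ps with
  | nil => intro d c; simp
  | cons p rest ih =>
    intro d c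
    simp only [List.foldl_cons, ih, PySem.Dict.getD_foldl_modify_add_one, List.countP_cons]
    have hnd : (pvPhaseSet p).Nodup := PySem.Set.nodup_ofList _
    by_cases h : c ∈ pvPhaseSet p
    · rw [List.count_eq_one_of_mem hnd h]
      simp only [h, decide_true, if_true]
      push_cast; ring
    · rw [List.count_eq_zero_of_not_mem h]
      simp only [h, decide_false]
      push_cast; ring

-- B's counter: keys are the conditions occurring in some phase
theorem pvCounterKeys (ps : List (String × List (String × List String))) :
    ∀ (d : PySem.Dict String Int) (c : String),
      c ∈ (ps.foldl (fun d p => (pvPhaseSet p).foldl (fun d c => d.modify c 0 (· + 1)) d) d).keys ↔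
        c ∈ d.keys ∨ ∃ p ∈ ps, c ∈ pvPhaseSet p := by
  induction ps with
  | nil => intro d c; simp
  | cons p rest ih =>
    intro d c
    simp only [List.foldl_cons, ih, PySem.Dict.keys_foldl_modify, PySem.Set.mem_update, List.mem_cons]
    constructor
    · rintro (⟨h | h⟩ | h)
      · exact Or.inl h
      · exact Or.inr ⟨p, Or.inl rfl, h⟩
      · rcases h with ⟨q, hq, hc⟩; exact Or.inr ⟨q, Or.inr hq, hc⟩
    · rintro (h | ⟨q, hq | hq, hc⟩)
      · exact Or.inl (Or.inl h)
      · subst hq; exact Or.inl (Or.inr hc)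
      · exact Or.inr ⟨q, hq, hc⟩

-- B's counter keys stay Nodup
theorem pvCounterNodup (ps : List (String × List (String × List String))) :
    ∀ (d : PySem.Dict String Int), d.keys.Nodup →
      (ps.foldl (fun d p => (pvPhaseSet p).foldl (fun d c => d.modify c 0 (· + 1)) d) d).keys.Nodup := by
  induction ps with
  | nil => intro d h; exact h
  | cons p rest ih =>
    intro d h
    refine ih _ ?_
    rw [PySem.Dict.keys_foldl_modify]
    exact PySem.Set.nodup_update _ _ h

-- ordered_conditions stays put once nonempty
theorem pvOrderedStable (ps : List (String × List (String × List String))) :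
    ∀ o : List String, o ≠ [] →
      ps.foldl (fun o p => if o.isEmpty then pvCondsA p.2 else o) o = o := by
  induction ps with
  | nil => intro o _; rfl
  | cons p rest ih =>
    intro o ho
    simp only [List.foldl_cons, List.isEmpty_eq_false_iff.mpr ho]
    exact ih o ho

-- filtering on membership-equal sets agrees
theorem pvDiffCongr (s t t' : PySem.Set String) (h : ∀ c, c ∈ t ↔ c ∈ t') :
    PySem.Set.diff s t = PySem.Set.diff s t' := by
  refine List.filter_congr ?_
  intro c _
  simp [PySem.Set.contains_eq_listContains, List.contains_eq_mem, h c]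


-- membership in {c for (c,k) in D.items() if k == n}, for a Dict with Nodup keys
theorem pvMemFilterMapKeys (D : PySem.Dict String Int) (hnd : D.keys.Nodup) (n : Int) (c : String) :
    c ∈ PySem.Set.ofList ((D.items.filter (fun q => q.2 == n)).map (fun q => q.1)) ↔
      c ∈ D.keys ∧ D.getD c 0 = n := by
  rw [PySem.Set.mem_ofList]
  simp only [List.mem_map, List.mem_filter]
  constructor
  · rintro ⟨⟨k, v⟩, ⟨hq, hv⟩, rfl⟩
    have hg : D.get? k = some v := PySem.Dict.get?_of_mem_items D hq hnd
    have hv' : v = n := by simpa using hv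
    exact ⟨PySem.Dict.mem_keys_of_mem_items D hq,
           by rw [PySem.Dict.getD_of_get?_eq_some D 0 hg, hv']⟩
  · rintro ⟨hk, hg⟩
    cases hopt : D.get? c with
    | none => exact absurd ((PySem.Dict.get?_eq_none_iff_not_mem_keys D c).mp hopt hk) (fun h => h)
    | some v =>
      have hv : v = n := by
        rw [PySem.Dict.getD_of_get?_eq_some D 0 hopt] at hg
        exact hg
      exact ⟨(c, v), ⟨PySem.Dict.mem_items_of_get?_eq_some D hopt, by simp [hv]⟩, rfl⟩

-- membership in B's common set, for a nonempty phase list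
theorem pvMemCommonB (p : String × List (String × List String))
    (rest : List (String × List (String × List String))) (c : String) :
    c ∈ PySem.Set.ofList (((((p :: rest).foldl
          (fun d q => (pvPhaseSet q).foldl (fun d c => d.modify c 0 (· + 1)) d)
          (PySem.Dict.empty : PySem.Dict String Int)).items.filter
            (fun q => q.2 == ((p :: rest).length : Int))).map (fun q => q.1))) ↔
      ∀ q ∈ p :: rest, c ∈ pvPhaseSet q := by
  have hnd := pvCounterNodup (p :: rest) PySem.Dict.empty PySem.Dict.nodup_keys_empty
  rw [pvMemFilterMapKeys _ hnd]
  rw [pvCounterGetD, pvCounterKeys]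
  simp only [PySem.Dict.keys_empty, PySem.Dict.getD_empty, List.not_mem_nil, false_or, zero_add]
  constructor
  · rintro ⟨-, hcount⟩
    have hc : (p :: rest).countP (fun q => decide (c ∈ pvPhaseSet q)) = (p :: rest).length := by
      exact_mod_cast hcount
    intro q hq
    simpa using (pvCountP_eq_length_iff (p :: rest) _).mp hc q hq
  · intro hall
    refine ⟨⟨p, List.mem_cons_self, hall p List.mem_cons_self⟩, ?_⟩
    have := (pvCountP_eq_length_iff (p :: rest) (fun q => decide (c ∈ pvPhaseSet q))).mpr
      (fun q hq => by simpa using hall q hq)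
    exact_mod_cast this


-- A's common component over a nonempty list, as a fold of intersections
theorem pvCommonA_cons (p : String × List (String × List String))
    (rest : List (String × List (String × List String))) :
    (p :: rest).foldl (fun c q => some (match c with
      | none => pvPhaseSet q
      | some cs => PySem.Set.inter cs (pvPhaseSet q))) none
    = some (rest.foldl (fun s q => PySem.Set.inter s (pvPhaseSet q)) (pvPhaseSet p)) := by
  rw [List.foldl_cons]
  exact pvCommonSome rest (pvPhaseSet p)


-- assembling the two return values once the two common sets have equal membership
theorem pvFinal (p : String × List (String × List String))
    (rest : List (String × List (String × List String)))
    (sA cB : PySem.Set String)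
    (hIff : ∀ c, c ∈ sA ↔ c ∈ cB)
    (hfirst : ∀ c, c ∈ sA → c ∈ pvPhaseSet p) :
    (if List.isEmpty sA = true then
      ([], (List.foldl (fun d p => d.insert p.1 PySem.Set.empty)
              (PySem.Dict.empty : PySem.Dict String (PySem.Set String)) (p :: rest)).items)
    else
      (List.filter (fun c => sA.contains c)
          (List.foldl (fun o p => if o.isEmpty = true then pvCondsA p.2 else o) [] (p :: rest)),
        (List.foldl (fun d q => d.insert q.1 (q.2.diff sA))
            (PySem.Dict.empty : PySem.Dict String (PySem.Set String))
            (List.foldl (fun d p => d.insert p.1 (pvPhaseSet p))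
              (PySem.Dict.empty : PySem.Dict String (PySem.Set String)) (p :: rest)).items).items)) =
    (if List.isEmpty cB = true then
      ([], (List.foldl (fun d p => d.insert p.1 PySem.Set.empty)
              (PySem.Dict.empty : PySem.Dict String (PySem.Set String)) (p :: rest)).items)
    else
      (List.filter (fun c => cB.contains c)
          (match (p :: rest).head? with
          | some p => pvCondsA p.2
          | none => []),
        (List.foldl (fun d q => d.insert q.1 (q.2.diff cB))
            (PySem.Dict.empty : PySem.Dict String (PySem.Set String))
            (List.foldl (fun d p => d.insert p.1 (pvPhaseSet p))
              (PySem.Dict.empty : PySem.Dict String (PySem.Set String)) (p :: rest)).items).items)) := by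
  have hEmpty : sA.isEmpty = cB.isEmpty := by
    rw [Bool.eq_iff_iff, List.isEmpty_iff, List.isEmpty_iff,
      List.eq_nil_iff_forall_not_mem, List.eq_nil_iff_forall_not_mem]
    constructor
    · intro h c hc; exact h c ((hIff c).mpr hc)
    · intro h c hc; exact h c ((hIff c).mp hc)
  rw [hEmpty]
  by_cases hE : cB.isEmpty = true
  · simp [hE]
  · simp only [hE, Bool.false_eq_true, if_false]
    have hcne : cB ≠ [] := fun hnil => hE (by simp [hnil])
    obtain ⟨c0, hc0⟩ := List.exists_mem_of_ne_nil cB hcne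
    have hc0A : c0 ∈ sA := (hIff c0).mpr hc0
    have hne : pvCondsA p.2 ≠ [] :=
      List.ne_nil_of_mem ((PySem.Set.mem_ofList _ _).mp (hfirst c0 hc0A))
    refine Prod.ext ?_ ?_
    · rw [List.foldl_cons]
      simp only [List.isEmpty_nil, if_true, List.head?_cons]
      rw [pvOrderedStable rest _ hne]
      refine List.filter_congr ?_
      intro c _
      rw [Bool.eq_iff_iff, PySem.Set.contains_iff, PySem.Set.contains_iff]
      exact hIff c
    · have hfun : (fun (d : PySem.Dict String (PySem.Set String))
          (q : String × PySem.Set String) => d.insert q.1 (PySem.Set.diff q.2 sA))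
        = (fun (d : PySem.Dict String (PySem.Set String))
          (q : String × PySem.Set String) => d.insert q.1 (PySem.Set.diff q.2 cB)) :=
        funext fun d => funext fun q => by rw [pvDiffCongr q.2 sA cB hIff]
      rw [hfun]

-- ===== VERDICT (by name: the statement is the Claim_ definition above) =====
theorem condition_intersection_with_order_py_spec : Claim_equal_condition_intersection_with_order_py := by
  unfold Claim_equal_condition_intersection_with_order_py Spec_condition_intersection_with_order_py
  intro ps _
  cases ps with
  | nil => rfl
  | cons p rest =>
    simp only [condition_intersection_with_order_py, condition_intersection_with_order_py_alt,
      pvFoldA, pvFoldB, pvCommonA_cons]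
    refine pvFinal p rest _ _ ?_ ?_
    · intro c
      rw [pvMemFoldInter, pvMemCommonB]
      simp
    · intro c hc
      exact ((pvMemFoldInter rest (pvPhaseSet p) c).mp hc).1
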